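-- pv_equiv track=rewrite | github.com/Kibet-g/PassResume | backend/enhanced_ai_job_matcher.py | _identify_skill_sections
-- ===== SOURCE A (Python) =====
-- from typing import Dict, List, Tuple, Optional, Any
--
-- def _identify_skill_sections(text: str) -> List[str]:
--     """Identify sections of text that likely contain skills"""
--     sections = []
--     lines = text.split('\n')
--
--     skill_section_headers = [
--         'skills', 'technical skills', 'technologies', 'tools',
--         'programming languages', 'software', 'expertise'
--     ]
--
--     in_skill_section = False
--     current_section = []
--
--     for line in lines:
--         line_lower = line.lower().strip()
--
--         # Check if this line is a skill section header
--         if any(header in line_lower for header in skill_section_headers):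
--             if current_section:
--                 sections.append('\n'.join(current_section))
--             current_section = [line]
--             in_skill_section = True
--         elif in_skill_section:
--             if line.strip() == '' or line_lower.startswith(('experience', 'education', 'work')):
--                 # End of skill section
--                 if current_section:
--                     sections.append('\n'.join(current_section))
--                 current_section = []
--                 in_skill_section = False
--             else:
--                 current_section.append(line)
--
--     if current_section:
--         sections.append('\n'.join(current_section))
--
--     return sections
-- ===== SOURCE B (Python) =====
-- def _identify_skill_sections(text: str) -> list:
--     """Two-level scan: seek a header line, then collect its section until a break."""
--     headers = ['skills', 'technical skills', 'technologies', 'tools',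
--                'programming languages', 'software', 'expertise']
--
--     def is_header(line):
--         ll = line.lower().strip()
--         return any(h in ll for h in headers)
--
--     def is_break(line):
--         ll = line.lower().strip()
--         return line.strip() == '' or ll.startswith(('experience', 'education', 'work'))
--
--     lines = text.split('\n')
--     n = len(lines)
--     sections = []
--     i = 0
--     while i < n:
--         if not is_header(lines[i]):
--             i += 1
--             continue
--         j = i + 1
--         while j < n and not is_header(lines[j]) and not is_break(lines[j]):
--             j += 1
--         sections.append('\n'.join(lines[i:j]))
--         if j < n and not is_header(lines[j]):
--             j += 1  # consume the blank/terminator line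
--         i = j
--     return sections
-- ===== Notes on version B (the rewrite author's own statement) =====
-- stated objective: alternative
-- what changed: Replaces A's single flag-driven state-machine loop (in_skill_section flag plus current_section accumulator, flushed at headers/breaks and at EOF) with a two-level scan: an outer loop seeks the next header line, an inner loop collects the whole section up to the next header/blank/terminator line, the section is joined and emitted in one place, and a break line is consumed before re-seeking.
import Mathlib
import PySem

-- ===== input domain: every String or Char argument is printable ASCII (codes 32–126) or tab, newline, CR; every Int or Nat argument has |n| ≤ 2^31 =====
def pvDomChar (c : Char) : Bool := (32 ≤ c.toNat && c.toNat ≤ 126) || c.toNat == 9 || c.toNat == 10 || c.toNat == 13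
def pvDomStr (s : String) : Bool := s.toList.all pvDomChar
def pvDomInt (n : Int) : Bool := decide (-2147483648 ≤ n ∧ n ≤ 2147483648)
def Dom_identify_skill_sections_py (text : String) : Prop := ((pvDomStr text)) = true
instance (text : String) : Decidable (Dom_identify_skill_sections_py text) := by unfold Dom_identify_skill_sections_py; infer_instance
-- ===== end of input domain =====

-- B replaces A's flag-driven state machine by a two-level scan (seek a header line, then
-- collect its whole section in an inner loop); alternative decomposition, same cost.

-- ===== PORT A =====
-- Shared line tests (both Pythons compute the identical per-line conditions)
def pvHeaders : List String :=
  ["skills", "technical skills", "technologies", "tools",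
   "programming languages", "software", "expertise"]

-- 'any(header in line.lower().strip() for header in skill_section_headers)'
def pvIsHeader (line : String) : Bool :=
  pvHeaders.any (fun h => PySem.Str.isIn h (PySem.Str.strip (PySem.Str.lower line)))

-- "line.strip() == '' or line.lower().strip().startswith(('experience','education','work'))"
def pvIsBreak (line : String) : Bool :=
  let ll := PySem.Str.strip (PySem.Str.lower line)
  (PySem.Str.strip line == "") || PySem.Str.startswith ll "experience" ||
    PySem.Str.startswith ll "education" || PySem.Str.startswith ll "work"

-- text.split('\n')  (separator is nonempty, so split? always returns a value)
def pvLines (text : String) : List String :=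
  (PySem.Str.split? text "\n").getD []

-- A's loop body: state = (sections, current_section, in_skill_section)
def pvStepA (st : List String × List String × Bool) (line : String) :
    List String × List String × Bool :=
  match st with
  | (secs, cur, inSec) =>
    if pvIsHeader line then
      ((if cur.isEmpty then secs else secs ++ [PySem.Str.join "\n" cur]), [line], true)
    else if inSec then
      if pvIsBreak line then
        ((if cur.isEmpty then secs else secs ++ [PySem.Str.join "\n" cur]), [], false)
      else (secs, cur ++ [line], true)
    else (secs, cur, inSec)

def identify_skill_sections_py (text : String) : List String :=
  let st := (pvLines text).foldl pvStepA ([], [], false)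
  if st.2.1.isEmpty then st.1 else st.1 ++ [PySem.Str.join "\n" st.2.1]

-- ===== PORT B =====
-- inner loop: collect body lines until a header/break line (or end); returns (body, rest)
def pvCollect : List String → List String × List String
  | [] => ([], [])
  | l :: ls =>
    if pvIsHeader l || pvIsBreak l then ([], l :: ls)
    else
      let p := pvCollect ls
      (l :: p.1, p.2)

-- "if j < n and not is_header(lines[j]): j += 1" — consume the blank/terminator line
def pvConsume : List String → List String
  | [] => []
  | r :: rs => if pvIsHeader r then r :: rs else rs

theorem pvCollect_len : ∀ ls : List String, (pvCollect ls).2.length ≤ ls.length := by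
  intro ls
  induction ls with
  | nil => simp [pvCollect]
  | cons l ls ih =>
    simp only [pvCollect]
    split
    · simp
    · simpa using Nat.le_succ_of_le ih

theorem pvConsume_len : ∀ ls : List String, (pvConsume ls).length ≤ ls.length := by
  intro ls
  cases ls with
  | nil => simp [pvConsume]
  | cons r rs => simp only [pvConsume]; split <;> simp

-- outer loop: advance to the next header line, emit its section, consume a break line
def pvSeek : List String → List String
  | [] => []
  | l :: ls =>
    if pvIsHeader l then
      PySem.Str.join "\n" (l :: (pvCollect ls).1) :: pvSeek (pvConsume (pvCollect ls).2)
    else pvSeek ls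
termination_by ls => ls.length
decreasing_by
  · have h1 := pvConsume_len (pvCollect ls).2
    have h2 := pvCollect_len ls
    simp only [List.length_cons]
    omega
  · simp

def identify_skill_sections_py_alt (text : String) : List String :=
  pvSeek (pvLines text)

-- ===== PRECONDITION & SPEC =====
def Spec_identify_skill_sections_py (text : String) (out : List String) : Prop := out = identify_skill_sections_py_alt text
instance (text : String) (out : List String) : Decidable (Spec_identify_skill_sections_py text out) := by unfold Spec_identify_skill_sections_py; infer_instance

-- ===== CLAIM (what is proved, stated in full; the proofs are below) =====
def Claim_equal_identify_skill_sections_py : Prop := ∀ (text : String), Dom_identify_skill_sections_py text → Spec_identify_skill_sections_py text (identify_skill_sections_py text)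

-- ===== LEMMAS AND PROOFS =====

-- run A's loop from a given state and apply the final flush
def pvRunA (ls : List String) (st : List String × List String × Bool) : List String :=
  let r := ls.foldl pvStepA st
  if r.2.1.isEmpty then r.1 else r.1 ++ [PySem.Str.join "\n" r.2.1]

theorem pvRunA_cons (l : String) (ls : List String) (st : List String × List String × Bool) :
    pvRunA (l :: ls) st = pvRunA ls (pvStepA st l) := by
  unfold pvRunA
  rw [List.foldl_cons]

-- the loop invariant: A's run from the two reachable state shapes equals B's scan
theorem pvMain : ∀ ls : List String,
    (∀ secs, pvRunA ls (secs, [], false) = secs ++ pvSeek ls) ∧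
    (∀ secs cur, cur ≠ [] →
      pvRunA ls (secs, cur, true) =
        secs ++ PySem.Str.join "\n" (cur ++ (pvCollect ls).1) ::
          pvSeek (pvConsume (pvCollect ls).2)) := by
  intro ls
  induction ls with
  | nil =>
    constructor
    · intro secs; simp [pvRunA, pvSeek]
    · intro secs cur hcur
      simp [pvRunA, pvCollect, pvConsume, pvSeek, List.isEmpty_eq_false_iff.mpr hcur]
  | cons l ls ih =>
    constructor
    · intro secs
      by_cases hh : pvIsHeader l
      · have hstep : pvStepA (secs, [], false) l = (secs, [l], true) := by
          simp [pvStepA, hh]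
        rw [pvRunA_cons, hstep, ih.2 secs [l] (by simp), pvSeek]
        simp [hh]
      · have hstep : pvStepA (secs, [], false) l = (secs, [], false) := by
          simp [pvStepA, hh]
        rw [pvRunA_cons, hstep, ih.1 secs, pvSeek]
        simp [hh]
    · intro secs cur hcur
      by_cases hh : pvIsHeader l
      · have hstep : pvStepA (secs, cur, true) l
            = (secs ++ [PySem.Str.join "\n" cur], [l], true) := by
          simp [pvStepA, hh, List.isEmpty_eq_false_iff.mpr hcur]
        rw [pvRunA_cons, hstep, ih.2 (secs ++ [PySem.Str.join "\n" cur]) [l] (by simp)]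
        have hcoll : pvCollect (l :: ls) = ([], l :: ls) := by
          simp [pvCollect, hh]
        rw [hcoll]
        have hcons : pvConsume (l :: ls) = l :: ls := by simp [pvConsume, hh]
        rw [hcons, pvSeek]
        simp [hh]
      · by_cases hb : pvIsBreak l
        · have hstep : pvStepA (secs, cur, true) l
              = (secs ++ [PySem.Str.join "\n" cur], [], false) := by
            simp [pvStepA, hh, hb, List.isEmpty_eq_false_iff.mpr hcur]
          rw [pvRunA_cons, hstep, ih.1 (secs ++ [PySem.Str.join "\n" cur])]
          have hcoll : pvCollect (l :: ls) = ([], l :: ls) := by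
            simp [pvCollect, hh, hb]
          rw [hcoll]
          have hcons : pvConsume (l :: ls) = ls := by simp [pvConsume, hh]
          rw [hcons]
          simp
        · have hstep : pvStepA (secs, cur, true) l = (secs, cur ++ [l], true) := by
            simp [pvStepA, hh, hb]
          rw [pvRunA_cons, hstep, ih.2 secs (cur ++ [l]) (by simp)]
          have hcoll : pvCollect (l :: ls)
              = (l :: (pvCollect ls).1, (pvCollect ls).2) := by
            simp [pvCollect, hh, hb]
          rw [hcoll]
          simp

-- ===== VERDICT (by name: the statement is the Claim_ definition above) =====
theorem identify_skill_sections_py_spec : Claim_equal_identify_skill_sections_py := by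
  intro text _
  unfold Spec_identify_skill_sections_py identify_skill_sections_py identify_skill_sections_py_alt
  have := (pvMain (pvLines text)).1 []
  simpa [pvRunA] using this
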